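-- pv_equiv track=rewrite | github.com/Hulyamr13/hackerrank | Absolute Element Sums.py | playingWithNumbers
-- ===== SOURCE A (Python) =====
-- def playingWithNumbers(arr, queries):
--     n = len(arr)
--     count = [0] * 4001
--     for i in arr:
--         count[2000 + i] += 1
--
--     sum_num_right = [n]
--     for i in range(4000):
--         sum_num_right.append(sum_num_right[i] - count[i])
--
--     sum_right = [0] * 4001
--     for i in range(4001):
--         sum_right[0] += count[i] * i
--
--     for i in range(1, 4001):
--         sum_right[i] = sum_right[i - 1] - sum_num_right[i]
--
--     sum_left = [0] * 4001
--     for i in range(4000, -1, -1):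
--         sum_left[4000] += count[i] * (4000 - i)
--
--     for i in range(3999, -1, -1):
--         sum_left[i] = sum_left[i + 1] - (n - sum_num_right[i + 1])
--
--     result = []
--     acc = 0
--     for i in queries:
--         acc += i
--         mid = 2000 - acc
--         if mid < 4001 and mid >= 0:
--             result.append(sum_right[mid] + sum_left[mid])
--         elif mid < 0:
--             result.append(sum_right[0] + n * abs(mid))
--         else:
--             result.append(sum_left[4000] + n * (mid - 4000))
--     return result
-- ===== SOURCE B (Python) =====
-- def playingWithNumbers(arr, queries):
--     result = []
--     acc = 0
--     for q in queries:
--         acc += q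
--         result.append(sum(abs(x + acc) for x in arr))
--     return result
-- ===== Notes on version B (the rewrite author's own statement) =====
-- stated objective: simpler
-- what changed: B drops A's 4001-slot histogram and the four prefix/suffix tables entirely and just rescans arr once per query summing abs(x+acc); same running-shift semantics, no tables.
-- outside the precondition, e.g. on playingWithNumbers([-3000], [0]): A returns [1001], B returns [3000]; on playingWithNumbers([-2001, -6001], [5]): A returns [4000], B returns [7992]
import Mathlib
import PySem

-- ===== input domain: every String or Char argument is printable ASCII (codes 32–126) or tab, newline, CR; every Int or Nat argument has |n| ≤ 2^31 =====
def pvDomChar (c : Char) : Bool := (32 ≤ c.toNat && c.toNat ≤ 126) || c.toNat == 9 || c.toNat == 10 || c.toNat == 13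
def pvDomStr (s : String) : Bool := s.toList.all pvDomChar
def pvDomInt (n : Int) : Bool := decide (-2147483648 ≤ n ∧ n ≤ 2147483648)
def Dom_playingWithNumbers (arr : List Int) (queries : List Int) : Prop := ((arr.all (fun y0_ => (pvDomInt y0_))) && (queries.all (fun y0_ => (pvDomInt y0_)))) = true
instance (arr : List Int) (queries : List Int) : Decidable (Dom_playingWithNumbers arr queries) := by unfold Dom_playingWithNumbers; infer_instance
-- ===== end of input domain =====

-- B replaces A's 4001-slot histogram and prefix/suffix tables with a plain per-query rescan
-- of arr summing |x + acc| (simpler, not faster).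

-- ===== PORT A =====
-- count[i] += 1 with Python's list-index semantics (negative index wraps; where Python
-- would raise IndexError — excluded by Pre_ — pySetD leaves the list unchanged)
def pvInc (c : List Int) (i : Int) : List Int :=
  PySem.List.pySetD c i (PySem.List.pyGetD c i 0 + 1)

def pvCount (arr : List Int) : List Int :=
  arr.foldl (fun c x => pvInc c (2000 + x)) (List.replicate 4001 0)

-- sum_num_right: starts as [n], appends sum_num_right[i] - count[i] for i in range(4000)
def pvSnr (c : List Int) (n : Int) : Nat → List Int
  | 0 => [n]
  | k + 1 => let s := pvSnr c n k; s ++ [s.getD k 0 - c.getD k 0]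

-- sum_right[0] accumulated over i in range(4001)
def pvS0 (c : List Int) : Int :=
  (List.range 4001).foldl (fun a i => a + c.getD i 0 * (i : Int)) 0

-- sum_left[4000] accumulated over i in range(4000, -1, -1)
def pvSTop (c : List Int) : Int :=
  ((List.range 4001).reverse).foldl (fun a i => a + c.getD i 0 * (4000 - (i : Int))) 0

-- sum_right[i] = sum_right[i-1] - sum_num_right[i] for i in range(1, 4001), written left to
-- right (the preallocated zeros of A's list are each overwritten before they are ever read)
def pvSr (s0 : Int) (snr : List Int) : Nat → List Int
  | 0 => [s0]
  | k + 1 => let s := pvSr s0 snr k; s ++ [s.getD k 0 - snr.getD (k + 1) 0]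

-- sum_left[i] = sum_left[i+1] - (n - sum_num_right[i+1]) for i in range(3999, -1, -1),
-- written right to left: (pvSl … k).getD j holds A's sum_left[4000 - k + j]
def pvSl (sTop : Int) (snr : List Int) (n : Int) : Nat → List Int
  | 0 => [sTop]
  | k + 1 => let s := pvSl sTop snr n k; (s.headD 0 - (n - snr.getD (4000 - k) 0)) :: s

-- the body of A's query loop (reads at nonnegative in-range indices are plain getD)
def pvQval (sr sl : List Int) (n : Int) (acc : Int) : Int :=
  let mid : Int := 2000 - acc
  if mid < 4001 ∧ 0 ≤ mid then sr.getD mid.toNat 0 + sl.getD mid.toNat 0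
  else if mid < 0 then sr.getD 0 0 + n * |mid|
  else sl.getD 4000 0 + n * (mid - 4000)

def playingWithNumbers (arr : List Int) (queries : List Int) : List Int :=
  let n : Int := arr.length
  let count := pvCount arr
  let snr := pvSnr count n 4000
  let sr := pvSr (pvS0 count) snr 4000
  let sl := pvSl (pvSTop count) snr n 4000
  (queries.foldl (fun (p : Int × List Int) q =>
      (p.1 + q, p.2 ++ [pvQval sr sl n (p.1 + q)])) ((0 : Int), ([] : List Int))).2

-- ===== PORT B =====
def pvAbsSum (arr : List Int) (acc : Int) : Int :=
  arr.foldl (fun s x => s + |x + acc|) 0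

def playingWithNumbers_alt (arr : List Int) (queries : List Int) : List Int :=
  (queries.foldl (fun (p : Int × List Int) q =>
      (p.1 + q, p.2 ++ [pvAbsSum arr (p.1 + q)])) ((0 : Int), ([] : List Int))).2

-- ===== PRECONDITION & SPEC =====
-- Pre_ excludes (a) elements outside [-6001, 2000], where A raises IndexError on
-- count[2000 + x], and (b) elements in [-6001, -2001], on which A still returns but
-- Python's negative-index wraparound silently counts x as x + 4001 — an accidental
-- value of A's indexing (B returns the true absolute sum there).
def Pre_playingWithNumbers (arr : List Int) (queries : List Int) : Prop :=
  ∀ x ∈ arr, -2000 ≤ x ∧ x ≤ 2000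
instance (arr : List Int) (queries : List Int) : Decidable (Pre_playingWithNumbers arr queries) := by
  unfold Pre_playingWithNumbers; infer_instance
def pvWitness_playingWithNumbers : List Int × List Int := ([1, -2, 0], [3, -1])

def Spec_playingWithNumbers (arr : List Int) (queries : List Int) (out : List Int) : Prop :=
  out = playingWithNumbers_alt arr queries
instance (arr : List Int) (queries : List Int) (out : List Int) : Decidable (Spec_playingWithNumbers arr queries out) := by
  unfold Spec_playingWithNumbers; infer_instance

-- ===== CLAIM (what is proved, stated in full; the proofs are below) =====
def Claim_equal_playingWithNumbers : Prop := ∀ (arr : List Int) (queries : List Int), Dom_playingWithNumbers arr queries → Pre_playingWithNumbers arr queries → Spec_playingWithNumbers arr queries (playingWithNumbers arr queries)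

-- ===== LEMMAS AND PROOFS =====

-- the value A effectively counts: elements in [-6001,-2001] wrap to x + 4001
def pvEff (x : Int) : Int := if x < -2000 then x + 4001 else x

-- A's tables, characterised as sums over arr
def pvR (arr : List Int) (m : Int) : Int := (arr.map (fun x => max (pvEff x + 2000 - m) 0)).sum
def pvL (arr : List Int) (m : Int) : Int := (arr.map (fun x => max (m - (pvEff x + 2000)) 0)).sum

theorem pvEff_bounds {x : Int} (h1 : -6001 ≤ x) (h2 : x ≤ 2000) :
    0 ≤ pvEff x + 2000 ∧ pvEff x + 2000 ≤ 4000 := by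
  unfold pvEff; split <;> omega

theorem getD_set_eq (l : List Int) (m j : Nat) (v : Int) (h : m < l.length) :
    (l.set m v).getD j 0 = if j = m then v else l.getD j 0 := by
  rw [List.getD_eq_getElem?_getD, List.getD_eq_getElem?_getD, List.getElem?_set]
  rcases eq_or_ne j m with rfl | hne
  · simp [h]
  · simp [Ne.symm hne, hne]

theorem getD_snoc (s : List Int) (v : Int) : (s ++ [v]).getD s.length 0 = v := by
  rw [List.getD_eq_getElem?_getD, List.getElem?_append_right (le_refl _)]
  simp

theorem getD_replicate (n j : Nat) (h : j < n) : (List.replicate n (0:Int)).getD j 0 = 0 := by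
  rw [List.getD_eq_getElem?_getD, List.getElem?_replicate]
  simp [h]

theorem pyIdx_eff (a : Int) (h1 : -6001 ≤ a) (h2 : a ≤ 2000) :
    PySem.List.pyIdx? 4001 (2000 + a) = some (pvEff a + 2000).toNat := by
  unfold PySem.List.pyIdx? pvEff
  split_ifs <;> simp_all <;> omega

theorem pvInc_eq (c : List Int) (hc : c.length = 4001) (a : Int)
    (h1 : -6001 ≤ a) (h2 : a ≤ 2000) :
    pvInc c (2000 + a)
      = c.set (pvEff a + 2000).toNat (c.getD (pvEff a + 2000).toNat 0 + 1) := by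
  unfold pvInc PySem.List.pySetD PySem.List.pySet? PySem.List.pyGetD PySem.List.pyGet?
  rw [hc, pyIdx_eff a h1 h2]
  simp [List.getD_eq_getElem?_getD]

theorem pvCount_foldl_getD (l : List Int) (c : List Int) (hc : c.length = 4001)
    (hb : ∀ x ∈ l, -6001 ≤ x ∧ x ≤ 2000) (j : Nat) (hj : j < 4001) :
    (l.foldl (fun c x => pvInc c (2000 + x)) c).getD j 0
      = c.getD j 0 + (l.countP (fun x => decide (pvEff x + 2000 = (j:Int))) : Int) := by
  induction l generalizing c with
  | nil => simp
  | cons a l ih =>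
      have ha := hb a (List.mem_cons_self)
      have hbnd := pvEff_bounds ha.1 ha.2
      simp only [List.foldl_cons]
      rw [pvInc_eq c hc a ha.1 ha.2,
        ih _ (by rw [List.length_set, hc]) (fun x hx => hb x (List.mem_cons_of_mem _ hx)),
        getD_set_eq _ _ _ _ (by rw [hc]; omega), List.countP_cons]
      by_cases hj2 : j = (pvEff a + 2000).toNat
      · have hd : (decide (pvEff a + 2000 = (j:Int))) = true := by
          simp only [decide_eq_true_eq]; omega
        rw [if_pos hj2, ← hj2]
        simp only [hd, if_true]
        omega
      · have hd : (decide (pvEff a + 2000 = (j:Int))) = false := by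
          simp only [decide_eq_false_iff_not]; omega
        rw [if_neg hj2]
        simp only [hd, Bool.false_eq_true, if_false]
        omega

theorem pvCount_getD (arr : List Int) (hb : ∀ x ∈ arr, -6001 ≤ x ∧ x ≤ 2000)
    (j : Nat) (hj : j < 4001) :
    (pvCount arr).getD j 0 = (arr.countP (fun x => decide (pvEff x + 2000 = (j:Int))) : Int) := by
  unfold pvCount
  rw [pvCount_foldl_getD arr _ (by rw [List.length_replicate]) hb j hj, getD_replicate _ _ hj, zero_add]

theorem countP_ge_split (l : List Int) (k : Int) :
    (l.countP (fun x => decide (k ≤ pvEff x + 2000)) : Int)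
      = (l.countP (fun x => decide (k + 1 ≤ pvEff x + 2000)) : Int)
        + (l.countP (fun x => decide (pvEff x + 2000 = k)) : Int) := by
  induction l with
  | nil => simp
  | cons a l ih =>
      simp only [List.countP_cons]
      push_cast
      rw [ih]
      simp only [decide_eq_true_eq]
      split_ifs <;> omega

theorem pvSnr_length (c : List Int) (n : Int) (k : Nat) : (pvSnr c n k).length = k + 1 := by
  induction k with
  | zero => rfl
  | succ k ih => simp [pvSnr, ih]

theorem pvSnr_getD (arr : List Int) (hb : ∀ x ∈ arr, -6001 ≤ x ∧ x ≤ 2000) :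
    ∀ k, k ≤ 4000 → ∀ m, m ≤ k →
      (pvSnr (pvCount arr) (arr.length : Int) k).getD m 0
        = (arr.countP (fun x => decide ((m:Int) ≤ pvEff x + 2000)) : Int) := by
  intro k
  induction k with
  | zero =>
      intro _ m hm
      have hm0 : m = 0 := by omega
      subst hm0
      have hall : arr.countP (fun x => decide (((0:Nat):Int) ≤ pvEff x + 2000)) = arr.length :=
        List.countP_eq_length.mpr (fun x hx => by
          simp only [decide_eq_true_eq]
          have := pvEff_bounds (hb x hx).1 (hb x hx).2
          omega)
      rw [hall]
      rfl
  | succ k ih =>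
      intro hk m hm
      simp only [pvSnr]
      rcases Nat.lt_or_ge m (k + 1) with h | h
      · rw [List.getD_append _ _ _ m (by rw [pvSnr_length]; omega)]
        exact ih (by omega) m (by omega)
      · have hm' : m = k + 1 := by omega
        subst hm'
        rw [show k + 1 = (pvSnr (pvCount arr) (arr.length : Int) k).length from
          (pvSnr_length _ _ _).symm, getD_snoc]
        rw [pvSnr_length]
        rw [ih (by omega) k le_rfl, pvCount_getD arr hb k (by omega)]
        push_cast
        rw [countP_ge_split arr (k : Int)]
        ring

theorem sum_range_ite (N : Nat) (m : Nat) (g : Nat → Int) :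
    ((List.range N).map (fun (i : Nat) => (if (m:Int) = (i:Int) then (1:Int) else 0) * g i)).sum
      = if m < N then g m else 0 := by
  induction N with
  | zero => simp
  | succ N ih =>
      rw [List.range_succ, List.map_append, List.sum_append, ih]
      rcases Nat.lt_trichotomy m N with h | rfl | h
      · simp [h, Nat.lt_succ_of_lt h]; omega
      · simp
      · have h1 : ¬ m < N := by omega
        have h2 : ¬ m < N + 1 := by omega
        have h2 : ¬ m < N + 1 := by omega
        simp [h1, h2]
        exact fun hEq => absurd hEq (by omega)

theorem sum_range_countP (l : List Int) (hb : ∀ x ∈ l, -6001 ≤ x ∧ x ≤ 2000) (g : Nat → Int) :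
    ((List.range 4001).map
        (fun (i : Nat) => (l.countP (fun x => decide (pvEff x + 2000 = (i:Int))) : Int) * g i)).sum
      = (l.map (fun x => g (pvEff x + 2000).toNat)).sum := by
  induction l with
  | nil =>
      rw [List.map_congr_left (fun (i : Nat) (_ : i ∈ List.range 4001) => by
        simp :
        ∀ i ∈ List.range 4001,
          ((([] : List Int).countP (fun x => decide (pvEff x + 2000 = (i:Int))) : Nat) : Int) * g i
            = (0:Int)), PySem.List.sum_map_const_int]
      simp
  | cons a l ih =>
      have ha := hb a (List.mem_cons_self)
      have hbnd := pvEff_bounds ha.1 ha.2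
      have hcong : ∀ i ∈ List.range 4001,
          (((a :: l).countP (fun x => decide (pvEff x + 2000 = (i:Int))) : Int)) * g i
            = ((l.countP (fun x => decide (pvEff x + 2000 = (i:Int))) : Int)) * g i
              + (if (((pvEff a + 2000).toNat : Nat) : Int) = (i:Int) then (1:Int) else 0) * g i := by
        intro i _
        rw [List.countP_cons]
        by_cases hcase : pvEff a + 2000 = (i:Int)
        · have h2 : (((pvEff a + 2000).toNat : Nat) : Int) = (i:Int) := by omega
          rw [if_pos h2]
          simp only [hcase, decide_true]
          push_cast
          ring
        · have h2 : ¬ ((((pvEff a + 2000).toNat : Nat) : Int) = (i:Int)) := by omega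
          rw [if_neg h2]
          simp only [hcase, decide_false]
          push_cast
          ring
      rw [List.map_congr_left hcong, PySem.List.sum_map_add_int,
        ih (fun x hx => hb x (List.mem_cons_of_mem _ hx)),
        sum_range_ite 4001 (pvEff a + 2000).toNat g, if_pos (by omega : (pvEff a + 2000).toNat < 4001)]
      rw [List.map_cons, List.sum_cons]
      ring

theorem pvS0_eq (arr : List Int) (hb : ∀ x ∈ arr, -6001 ≤ x ∧ x ≤ 2000) :
    pvS0 (pvCount arr) = pvR arr 0 := by
  unfold pvS0
  rw [PySem.List.foldl_add, zero_add]
  rw [List.map_congr_left (fun i hi => by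
    rw [pvCount_getD arr hb i (List.mem_range.mp hi)] :
    ∀ i ∈ List.range 4001, (pvCount arr).getD i 0 * (i : Int)
      = ((arr.countP (fun x => decide (pvEff x + 2000 = (i:Int))) : Int)) * (i : Int))]
  rw [sum_range_countP arr hb (fun i => (i : Int))]
  unfold pvR
  exact congrArg List.sum (List.map_congr_left (fun x hx => by
    have := pvEff_bounds (hb x hx).1 (hb x hx).2
    rw [max_eq_left (by omega)]
    omega))

theorem pvSTop_eq (arr : List Int) (hb : ∀ x ∈ arr, -6001 ≤ x ∧ x ≤ 2000) :
    pvSTop (pvCount arr) = pvL arr 4000 := by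
  unfold pvSTop
  rw [PySem.List.foldl_add, zero_add, List.map_reverse, List.sum_reverse]
  rw [List.map_congr_left (fun i hi => by
    rw [pvCount_getD arr hb i (List.mem_range.mp hi)] :
    ∀ i ∈ List.range 4001, (pvCount arr).getD i 0 * (4000 - (i : Int))
      = ((arr.countP (fun x => decide (pvEff x + 2000 = (i:Int))) : Int)) * (4000 - (i : Int)))]
  rw [sum_range_countP arr hb (fun i => 4000 - (i : Int))]
  unfold pvL
  exact congrArg List.sum (List.map_congr_left (fun x hx => by
    have := pvEff_bounds (hb x hx).1 (hb x hx).2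
    rw [max_eq_left (by omega)]
    omega))

theorem pvR_step (l : List Int) (k : Int) :
    pvR l (k + 1)
      = pvR l k - (l.countP (fun x => decide (k + 1 ≤ pvEff x + 2000)) : Int) := by
  have key : (l.map (fun x => max (pvEff x + 2000 - k) 0)).sum
      = (l.map (fun x => max (pvEff x + 2000 - (k + 1)) 0)).sum
        + (l.countP (fun x => decide (k + 1 ≤ pvEff x + 2000)) : Int) := by
    rw [← PySem.List.sum_map_ite_one_zero (fun x => decide (k + 1 ≤ pvEff x + 2000)) l,
      ← PySem.List.sum_map_add_int]
    refine congrArg List.sum (List.map_congr_left (fun x _ => ?_))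
    simp only [decide_eq_true_eq]
    by_cases h : k + 1 ≤ pvEff x + 2000
    · rw [if_pos h, max_eq_left (by omega), max_eq_left (by omega)]
      ring
    · rw [if_neg h, max_eq_right (by omega), max_eq_right (by omega)]
      ring
  unfold pvR
  omega

theorem pvL_step (l : List Int) (k : Int) :
    pvL l (k - 1)
      = pvL l k - ((l.length : Int)
          - (l.countP (fun x => decide (k ≤ pvEff x + 2000)) : Int)) := by
  have key : (l.map (fun x => max (k - (pvEff x + 2000)) 0)).sum
        + (l.countP (fun x => decide (k ≤ pvEff x + 2000)) : Int)
      = (l.map (fun x => max (k - 1 - (pvEff x + 2000)) 0)).sum + (l.length : Int) := by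
    rw [← PySem.List.sum_map_ite_one_zero (fun x => decide (k ≤ pvEff x + 2000)) l,
      ← PySem.List.sum_map_add_int,
      show ((l.length : Int)) = (l.map (fun (_ : Int) => (1:Int))).sum from by
        rw [PySem.List.sum_map_const_int]; ring,
      ← PySem.List.sum_map_add_int]
    refine congrArg List.sum (List.map_congr_left (fun x _ => ?_))
    simp only [decide_eq_true_eq]
    by_cases h : k ≤ pvEff x + 2000
    · rw [if_pos h, max_eq_right (by omega), max_eq_right (by omega)]
    · rw [if_neg h, max_eq_left (by omega), max_eq_left (by omega)]
      ring
  unfold pvL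
  omega

theorem pvSr_length (s0 : Int) (snr : List Int) (k : Nat) : (pvSr s0 snr k).length = k + 1 := by
  induction k with
  | zero => rfl
  | succ k ih => simp [pvSr, ih]

-- headD of a nonempty list is its entry 0
theorem headD_eq_getD (l : List Int) (h : l ≠ []) : l.headD 0 = l.getD 0 0 := by
  cases l with
  | nil => exact absurd rfl h
  | cons a l => rfl

theorem pvSr_getD (arr : List Int) (hb : ∀ x ∈ arr, -6001 ≤ x ∧ x ≤ 2000) :
    ∀ k, k ≤ 4000 → ∀ m, m ≤ k →
      (pvSr (pvS0 (pvCount arr)) (pvSnr (pvCount arr) (arr.length : Int) 4000) k).getD m 0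
        = pvR arr (m : Int) := by
  intro k
  induction k with
  | zero =>
      intro _ m hm
      have hm0 : m = 0 := by omega
      subst hm0
      simp only [pvSr, List.getD_cons_zero, Nat.cast_zero]
      exact pvS0_eq arr hb
  | succ k ih =>
      intro hk m hm
      simp only [pvSr]
      rcases Nat.lt_or_ge m (k + 1) with h | h
      · rw [List.getD_append _ _ _ m (by rw [pvSr_length]; omega)]
        exact ih (by omega) m (by omega)
      · have hm' : m = k + 1 := by omega
        subst hm'
        rw [show k + 1 = (pvSr (pvS0 (pvCount arr))
            (pvSnr (pvCount arr) (arr.length : Int) 4000) k).length from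
          (pvSr_length _ _ _).symm, getD_snoc]
        rw [pvSr_length]
        rw [ih (by omega) k le_rfl, pvSnr_getD arr hb 4000 le_rfl (k + 1) (by omega)]
        push_cast
        rw [pvR_step arr (k : Int)]

theorem pvSl_length (sTop : Int) (snr : List Int) (n : Int) (k : Nat) :
    (pvSl sTop snr n k).length = k + 1 := by
  induction k with
  | zero => rfl
  | succ k ih => simp [pvSl, ih]

theorem pvSl_getD (arr : List Int) (hb : ∀ x ∈ arr, -6001 ≤ x ∧ x ≤ 2000) :
    ∀ k, k ≤ 4000 → ∀ j, j ≤ k →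
      (pvSl (pvSTop (pvCount arr)) (pvSnr (pvCount arr) (arr.length : Int) 4000)
          (arr.length : Int) k).getD j 0
        = pvL arr ((4000 - k + j : Nat) : Int) := by
  intro k
  induction k with
  | zero =>
      intro _ j hj
      have hj0 : j = 0 := by omega
      subst hj0
      simp only [pvSl, List.getD_cons_zero]
      rw [pvSTop_eq arr hb, show ((4000 - 0 + 0 : Nat) : Int) = (4000:Int) from by omega]
  | succ k ih =>
      intro hk j hj
      simp only [pvSl]
      cases j with
      | zero =>
          rw [List.getD_cons_zero,
            headD_eq_getD _ (by
              have := pvSl_length (pvSTop (pvCount arr))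
                (pvSnr (pvCount arr) (arr.length : Int) 4000) (arr.length : Int) k
              intro hnil; rw [hnil] at this; simp at this),
            ih (by omega) 0 (by omega),
            pvSnr_getD arr hb 4000 le_rfl (4000 - k) (by omega)]
          rw [show ((4000 - (k + 1) + 0 : Nat) : Int) = ((4000 - k + 0 : Nat) : Int) - 1 from by omega]
          rw [show ((4000 - k : Nat) : Int) = ((4000 - k + 0 : Nat) : Int) from by omega]
          exact (pvL_step arr ((4000 - k + 0 : Nat) : Int)).symm
      | succ j =>
          rw [List.getD_cons_succ, ih (by omega) j (by omega)]
          congr 1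
          omega

theorem max_add_max_neg (a : Int) : max a 0 + max (-a) 0 = |a| := by
  rcases le_total 0 a with h | h
  · rw [max_eq_left h, max_eq_right (by omega), abs_of_nonneg h]; ring
  · rw [max_eq_right h, max_eq_left (by omega), abs_of_nonpos h]; ring

theorem pvQval_eq (arr : List Int) (hb : ∀ x ∈ arr, -6001 ≤ x ∧ x ≤ 2000) (acc : Int) :
    pvQval (pvSr (pvS0 (pvCount arr)) (pvSnr (pvCount arr) (arr.length : Int) 4000) 4000)
        (pvSl (pvSTop (pvCount arr)) (pvSnr (pvCount arr) (arr.length : Int) 4000)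
          (arr.length : Int) 4000)
        (arr.length : Int) acc
      = (arr.map (fun x => |pvEff x + acc|)).sum := by
  simp only [pvQval]
  split_ifs with h1 h2
  · rw [pvSr_getD arr hb 4000 le_rfl (2000 - acc).toNat (by omega),
      pvSl_getD arr hb 4000 le_rfl (2000 - acc).toNat (by omega),
      show (4000 - 4000 + (2000 - acc).toNat : Nat) = (2000 - acc).toNat from by omega]
    unfold pvR pvL
    rw [← PySem.List.sum_map_add_int]
    refine congrArg List.sum (List.map_congr_left (fun x hx => ?_))
    have hbd := pvEff_bounds (hb x hx).1 (hb x hx).2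
    rw [show pvEff x + 2000 - (((2000 - acc).toNat : Nat) : Int) = pvEff x + acc from by omega,
      show (((2000 - acc).toNat : Nat) : Int) - (pvEff x + 2000) = -(pvEff x + acc) from by omega]
    exact max_add_max_neg _
  · rw [pvSr_getD arr hb 4000 le_rfl 0 (by omega), abs_of_neg h2]
    unfold pvR
    rw [show (arr.length : Int) * -(2000 - acc) = (arr.map (fun (_ : Int) => acc - 2000)).sum from by
      rw [PySem.List.sum_map_const_int]; ring]
    rw [← PySem.List.sum_map_add_int]
    refine congrArg List.sum (List.map_congr_left (fun x hx => ?_))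
    have hbd := pvEff_bounds (hb x hx).1 (hb x hx).2
    rw [abs_of_nonneg (by omega), max_eq_left (by omega)]
    push_cast
    ring
  · rw [pvSl_getD arr hb 4000 le_rfl 4000 le_rfl,
      show (4000 - 4000 + 4000 : Nat) = (4000 : Nat) from by omega]
    unfold pvL
    rw [show (arr.length : Int) * (2000 - acc - 4000) = (arr.map (fun (_ : Int) => -2000 - acc)).sum from by
      rw [PySem.List.sum_map_const_int]; ring]
    rw [← PySem.List.sum_map_add_int]
    refine congrArg List.sum (List.map_congr_left (fun x hx => ?_))
    have hbd := pvEff_bounds (hb x hx).1 (hb x hx).2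
    rw [abs_of_neg (by omega), max_eq_left (by omega)]
    push_cast
    omega

theorem fold_out (vA vB : Int → Int) (h : ∀ acc, vA acc = vB acc) :
    ∀ (qs : List Int) (acc : Int) (res : List Int),
      (qs.foldl (fun (p : Int × List Int) q => (p.1 + q, p.2 ++ [vA (p.1 + q)])) (acc, res)).2
        = (qs.foldl (fun (p : Int × List Int) q => (p.1 + q, p.2 ++ [vB (p.1 + q)])) (acc, res)).2 := by
  intro qs acc res
  simp only [h]

theorem pvAbsSum_eq (arr : List Int) (acc : Int) :
    pvAbsSum arr acc = (arr.map (fun x => |x + acc|)).sum := by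
  unfold pvAbsSum
  rw [PySem.List.foldl_add, zero_add]

theorem pvEff_eq_self {x : Int} (h : -2000 ≤ x) : pvEff x = x := by
  unfold pvEff; split <;> omega

-- ===== VERDICT (by name: the statement is the Claim_ definition above) =====
theorem playingWithNumbers_spec : Claim_equal_playingWithNumbers := by
  intro arr queries _ hPre
  show playingWithNumbers arr queries = playingWithNumbers_alt arr queries
  have hb : ∀ x ∈ arr, -6001 ≤ x ∧ x ≤ 2000 := fun x hx => ⟨by have := (hPre x hx).1; omega, (hPre x hx).2⟩
  have hv : ∀ acc : Int,
      pvQval (pvSr (pvS0 (pvCount arr)) (pvSnr (pvCount arr) (arr.length : Int) 4000) 4000)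
        (pvSl (pvSTop (pvCount arr)) (pvSnr (pvCount arr) (arr.length : Int) 4000)
          (arr.length : Int) 4000) (arr.length : Int) acc
      = pvAbsSum arr acc := by
    intro acc
    rw [pvQval_eq arr hb acc, pvAbsSum_eq]
    exact congrArg List.sum (List.map_congr_left (fun x hxm => by
      rw [pvEff_eq_self (hPre x hxm).1]))
  simp only [playingWithNumbers, playingWithNumbers_alt]
  exact fold_out _ _ hv queries 0 []
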